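-- pv_equiv track=rewrite | github.com/tk211020/HackerRank | GamingArray1/mySolution.py | gamingArray
-- ===== SOURCE A (Python) =====
-- def gamingArray(arr):
--     # Write your code here
--     c = 0
--     while len(arr) != 0:
--         arr = arr[:arr.index(max(arr))]
--         c = c + 1
--     if c % 2 == 0:
--         return "ANDY"
--     else : return "BOB"
-- ===== SOURCE B (Python) =====
-- def gamingArray(arr):
--     # Single left-to-right pass counting strict record maxima; parity decides the winner.
--     c = 0
--     best = None
--     for x in arr:
--         if best is None or x > best:
--             best = x
--             c += 1
--     return "ANDY" if c % 2 == 0 else "BOB"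
-- ===== Notes on version B (the rewrite author's own statement) =====
-- stated objective: faster
-- what changed: Replaces the repeated max/index/truncate while-loop (quadratic) with a single pass counting left-to-right strict record maxima and checking the parity of that count.
import Mathlib
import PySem

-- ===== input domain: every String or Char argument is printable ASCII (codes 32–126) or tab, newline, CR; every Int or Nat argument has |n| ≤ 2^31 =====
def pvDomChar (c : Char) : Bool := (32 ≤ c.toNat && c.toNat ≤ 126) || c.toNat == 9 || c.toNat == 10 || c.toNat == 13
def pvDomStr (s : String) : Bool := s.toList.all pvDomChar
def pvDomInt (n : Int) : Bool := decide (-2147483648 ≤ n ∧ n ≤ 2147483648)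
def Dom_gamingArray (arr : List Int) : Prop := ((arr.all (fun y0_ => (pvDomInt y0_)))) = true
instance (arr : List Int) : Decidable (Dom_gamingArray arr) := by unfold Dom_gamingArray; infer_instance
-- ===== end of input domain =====

-- B replaces A's repeated max/index/truncate while-loop by a single pass counting
-- strict record maxima and checking its parity (objective: faster).

-- ===== PORT A =====
-- the while-loop: arr = arr[:arr.index(max(arr))]; c = c + 1, until arr is empty
def gamingArrayGo (arr : List Int) (c : Int) : Int :=
  match PySem.List.max? arr (fun x => x) with
  | none => c                     -- len(arr) == 0: loop exits
  | some m =>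
    match hi : PySem.List.index? arr m with
    | none => c                   -- unreachable: max(arr) is in arr
    | some i =>
      gamingArrayGo (PySem.List.slice arr none (some (i : Int))) (c + 1)
termination_by arr.length
decreasing_by
  have hmem := PySem.List.getElem_of_index?_eq_some hi
  obtain ⟨hk, -, -⟩ := hmem
  rw [PySem.List.slice_to_natCast]
  simpa using hk

def gamingArray (arr : List Int) : String :=
  let c := gamingArrayGo arr 0
  if c % 2 == 0 then "ANDY" else "BOB"

-- ===== PORT B =====
-- the for-loop body: update (count, best) with the next element
def gamingArrayStep (s : Int × Option Int) (x : Int) : Int × Option Int :=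
  match s.2 with
  | none => (s.1 + 1, some x)
  | some b => if b < x then (s.1 + 1, some x) else s

def gamingArray_alt (arr : List Int) : String :=
  let s := arr.foldl gamingArrayStep (0, none)
  if s.1 % 2 == 0 then "ANDY" else "BOB"

-- ===== PRECONDITION & SPEC =====
def Spec_gamingArray (arr : List Int) (out : String) : Prop := out = gamingArray_alt arr
instance (arr : List Int) (out : String) : Decidable (Spec_gamingArray arr out) := by unfold Spec_gamingArray; infer_instance

-- ===== CLAIM (what is proved, stated in full; the proofs are below) =====
def Claim_equal_gamingArray : Prop := ∀ (arr : List Int), Dom_gamingArray arr → Spec_gamingArray arr (gamingArray arr)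

-- ===== LEMMAS AND PROOFS =====

-- the record count of B, starting from a fresh state
def pvRecs (arr : List Int) : Int := (arr.foldl gamingArrayStep (0, none)).1

-- once the best is a maximum of everything remaining, the fold is the identity
theorem pvFold_const (xs : List Int) (c m : Int) (h : ∀ x ∈ xs, x ≤ m) :
    xs.foldl gamingArrayStep (c, some m) = (c, some m) := by
  induction xs with
  | nil => rfl
  | cons x t ih =>
    have hx : ¬ m < x := not_lt.mpr (h x (List.mem_cons_self ..))
    simp only [List.foldl_cons, gamingArrayStep, hx]
    exact ih (fun y hy => h y (List.mem_cons_of_mem _ hy))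

-- the best component is either the initial one or an element of the list
theorem pvBest_mem (xs : List Int) (c : Int) (b : Option Int) :
    (xs.foldl gamingArrayStep (c, b)).2 = b ∨
      ∃ v ∈ xs, (xs.foldl gamingArrayStep (c, b)).2 = some v := by
  induction xs generalizing c b with
  | nil => exact Or.inl rfl
  | cons x t ih =>
    simp only [List.foldl_cons]
    have step : gamingArrayStep (c, b) x = (c + 1, some x) ∨ gamingArrayStep (c, b) x = (c, b) := by
      cases b with
      | none => exact Or.inl rfl
      | some v =>
        by_cases h : v < x
        · exact Or.inl (by simp [gamingArrayStep, h])
        · exact Or.inr (by simp [gamingArrayStep, h])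
    rcases step with h | h
    · rw [h]
      rcases ih (c + 1) (some x) with h2 | ⟨v, hv, h2⟩
      · exact Or.inr ⟨x, List.mem_cons_self .., h2⟩
      · exact Or.inr ⟨v, List.mem_cons_of_mem _ hv, h2⟩
    · rw [h]
      rcases ih c b with h2 | ⟨v, hv, h2⟩
      · exact Or.inl h2
      · exact Or.inr ⟨v, List.mem_cons_of_mem _ hv, h2⟩

-- decomposition at the first occurrence of the maximum: one more record than the prefix
theorem pvRecs_decomp (pre suf : List Int) (m : Int)
    (hpre : ∀ x ∈ pre, x < m) (hsuf : ∀ x ∈ suf, x ≤ m) :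
    pvRecs (pre ++ m :: suf) = pvRecs pre + 1 := by
  unfold pvRecs
  rw [List.foldl_append, List.foldl_cons]
  set s := pre.foldl gamingArrayStep (0, none) with hs
  have hstep : gamingArrayStep s m = (s.1 + 1, some m) := by
    rcases pvBest_mem pre 0 none with h | ⟨v, hv, h⟩
    · rw [← hs] at h
      simp [gamingArrayStep, h]
    · rw [← hs] at h
      simp [gamingArrayStep, h, hpre v hv]
  rw [hstep, pvFold_const suf (s.1 + 1) m hsuf]

-- A's loop adds exactly B's record count to its accumulator
theorem pvGo_eq (n : Nat) : ∀ (arr : List Int), arr.length ≤ n → ∀ c,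
    gamingArrayGo arr c = c + pvRecs arr := by
  induction n with
  | zero =>
    intro arr h c
    have : arr = [] := List.eq_nil_of_length_eq_zero (Nat.le_zero.mp h)
    subst this
    simp [gamingArrayGo, PySem.List.max?, pvRecs]
  | succ n ih =>
    intro arr hlen c
    rw [gamingArrayGo]
    split
    · next hm =>
      have : arr = [] := (PySem.List.max?_eq_none_iff ..).mp hm
      subst this
      simp [pvRecs]
    · next m hm =>
      have hmax : ∀ y ∈ arr, y ≤ m := by
        have := PySem.List.max?_isMax hm
        simpa using this
      have hmem : m ∈ arr := PySem.List.max?_mem hm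
      split
      · next hi => exact absurd ((PySem.List.index?_eq_none_iff ..).mp hi) (by simpa using hmem)
      · next i hi =>
        obtain ⟨pre, suf, harr, hlenpre, hnotin⟩ := (PySem.List.index?_eq_some_iff ..).mp hi
        have hpre : ∀ x ∈ pre, x < m := by
          intro x hx
          have hle : x ≤ m := hmax x (by rw [harr]; exact List.mem_append_left _ hx)
          rcases lt_or_eq_of_le hle with h | h
          · exact h
          · exact absurd (h ▸ hx) hnotin
        have hsuf : ∀ x ∈ suf, x ≤ m := fun x hx =>
          hmax x (by rw [harr]; exact List.mem_append_right _ (List.mem_cons_of_mem _ hx))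
        have hslice : PySem.List.slice arr none (some (i : Int)) = pre := by
          rw [PySem.List.slice_to_natCast, harr, ← hlenpre]
          simp
        rw [hslice]
        have hlt : pre.length ≤ n := by
          have : pre.length < arr.length := by
            rw [harr]; simp [List.length_append]
          omega
        rw [ih pre hlt (c + 1), harr, pvRecs_decomp pre suf m hpre hsuf]
        ring

-- ===== VERDICT (by name: the statement is the Claim_ definition above) =====
theorem gamingArray_spec : Claim_equal_gamingArray := by
  intro arr _
  unfold Spec_gamingArray gamingArray gamingArray_alt
  have := pvGo_eq arr.length arr le_rfl 0
  rw [this]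
  simp [pvRecs]
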